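-- pv_equiv track=rewrite | github.com/raswanthmalai19/VisionCraft-Text-to-Comic-Video-Generator | comic_generator.py | calculate_page_layout
-- ===== SOURCE A (Python) =====
-- import math
--
-- MIN_PANELS_PER_PAGE = 4
--
-- MAX_PANELS_PER_PAGE = 8
--
-- PREFERRED_PANELS_PER_PAGE = 6
--
-- def calculate_optimal_layout(num_panels):
--     """Calculate the best grid layout for the given number of panels."""
--     if num_panels <= 2:
--         return 2, 1  # 2 panels per row, 1 row
--     elif num_panels <= 4:
--         return 2, 2  # 2x2 grid
--     elif num_panels <= 6:
--         return 3, 2  # 3x2 grid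
--     elif num_panels <= 9:
--         return 3, 3  # 3x3 grid
--     else:
--         return 4, math.ceil(num_panels / 4)  # 4 panels per row
--
-- def calculate_page_layout(total_panels):
--     """Calculate how to distribute panels across multiple pages."""
--     if total_panels <= MAX_PANELS_PER_PAGE:
--         # Single page
--         return [(total_panels, calculate_optimal_layout(total_panels))]
--
--     # Multiple pages needed
--     pages = []
--     remaining_panels = total_panels
--
--     while remaining_panels > 0:
--         if remaining_panels <= MAX_PANELS_PER_PAGE:
--             # Last page - use all remaining panels if >= MIN_PANELS_PER_PAGE
--             if remaining_panels >= MIN_PANELS_PER_PAGE: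
--                 panels_this_page = remaining_panels
--             else:
--                 # If less than minimum, redistribute from previous page
--                 if pages:
--                     # Take some panels from the last page
--                     last_page_panels = pages[-1][0]
--                     redistribute = min(2, last_page_panels - MIN_PANELS_PER_PAGE)
--                     pages[-1] = (last_page_panels - redistribute, calculate_optimal_layout(last_page_panels - redistribute))
--                     panels_this_page = remaining_panels + redistribute
--                 else:
--                     panels_this_page = remaining_panels
--         else:
--             # Not the last page - use preferred number
--             panels_this_page = PREFERRED_PANELS_PER_PAGE
--
--         layout = calculate_optimal_layout(panels_this_page)
--         pages.append((panels_this_page, layout))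
--         remaining_panels -= panels_this_page
--
--     return pages
-- ===== SOURCE B (Python) =====
-- import math
--
-- def calculate_optimal_layout(num_panels):
--     """Calculate the best grid layout for the given number of panels."""
--     if num_panels <= 2:
--         return 2, 1
--     elif num_panels <= 4:
--         return 2, 2
--     elif num_panels <= 6:
--         return 3, 2
--     elif num_panels <= 9:
--         return 3, 3
--     else:
--         return 4, math.ceil(num_panels / 4)
--
-- def calculate_page_layout(total_panels):
--     """Closed-form page distribution: full 6-panel pages plus an arithmetically computed tail."""
--     if total_panels <= 8:
--         return [(total_panels, calculate_optimal_layout(total_panels))]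
--     # number of 6-panel pages emitted before the remainder drops to <= 8
--     full_sixes = -(-(total_panels - 8) // 6)
--     leftover = total_panels - 6 * full_sixes   # always in 3..8
--     pages = [(6, calculate_optimal_layout(6))] * full_sixes
--     if leftover >= 4:
--         pages.append((leftover, calculate_optimal_layout(leftover)))
--     else:
--         # leftover == 3: borrow 2 panels from the last full page
--         pages[-1] = (4, calculate_optimal_layout(4))
--         pages.append((leftover + 2, calculate_optimal_layout(leftover + 2)))
--     return pages
-- ===== Notes on version B (the rewrite author's own statement) =====
-- stated objective: faster
-- what changed: Replaces A's page-by-page while loop with closed-form arithmetic: the number of full 6-panel pages and the leftover are computed by a ceiling division, the interior pages are built by list multiplication, and the tail page (plus the leftover==3 borrow case) is appended directly.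
import Mathlib
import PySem

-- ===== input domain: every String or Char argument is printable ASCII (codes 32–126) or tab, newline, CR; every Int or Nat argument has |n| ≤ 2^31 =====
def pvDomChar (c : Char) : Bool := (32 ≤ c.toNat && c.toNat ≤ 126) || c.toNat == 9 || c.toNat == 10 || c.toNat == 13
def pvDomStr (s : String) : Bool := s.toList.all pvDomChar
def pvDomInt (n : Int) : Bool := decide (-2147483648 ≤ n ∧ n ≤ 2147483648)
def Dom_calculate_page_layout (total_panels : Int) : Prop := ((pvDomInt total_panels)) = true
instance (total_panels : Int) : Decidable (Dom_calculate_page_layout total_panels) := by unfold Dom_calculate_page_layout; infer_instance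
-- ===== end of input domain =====

-- B replaces A's page-by-page while loop with closed-form arithmetic (ceiling division gives the
-- number of full 6-panel pages, the tail page(s) are appended directly); objective: faster.


-- ===== PORT A =====
-- shared module helper calculate_optimal_layout (used by both Pythons);
-- math.ceil(n/4) is exact integer ceiling division for |n| ≤ 2^31 (float division is exact there)
def pvOpt (num_panels : Int) : Int × Int :=
  if num_panels ≤ 2 then (2, 1)
  else if num_panels ≤ 4 then (2, 2)
  else if num_panels ≤ 6 then (3, 2)
  else if num_panels ≤ 9 then (3, 3)
  else (4, -(PySem.Int.floordiv (-num_panels) 4))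

-- A's while loop, fuel-bounded (fuel = total_panels.toNat suffices: every iteration removes ≥ 3 panels)
def pvLoopA (fuel : Nat) (pages : List (Int × (Int × Int))) (remaining : Int) :
    List (Int × (Int × Int)) :=
  match fuel with
  | 0 => pages
  | f + 1 =>
    if remaining > 0 then
      let s : List (Int × (Int × Int)) × Int :=
        if remaining ≤ 8 then
          if remaining ≥ 4 then (pages, remaining)
          else
            match pages.getLast? with
            | some lp =>
              let red := min 2 (lp.1 - 4)
              (pages.dropLast ++ [(lp.1 - red, pvOpt (lp.1 - red))], remaining + red)
            | none => (pages, remaining)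
        else (pages, 6)
      pvLoopA f (s.1 ++ [(s.2, pvOpt s.2)]) (remaining - s.2)
    else pages

def calculate_page_layout (total_panels : Int) : List (Int × (Int × Int)) :=
  if total_panels ≤ 8 then [(total_panels, pvOpt total_panels)]
  else pvLoopA total_panels.toNat [] total_panels

-- ===== PORT B =====
-- Source B's  full_sixes = -(-(total_panels - 8) // 6)
def pvFull (total_panels : Int) : Int := -(PySem.Int.floordiv (-(total_panels - 8)) 6)

-- the multi-page (total_panels > 8) branch of Source B
def pvTail (total_panels : Int) : List (Int × (Int × Int)) :=
  let full_sixes := pvFull total_panels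
  let leftover := total_panels - 6 * full_sixes
  let pages := List.replicate full_sixes.toNat (6, pvOpt 6)
  if 4 ≤ leftover then pages ++ [(leftover, pvOpt leftover)]
  else pages.dropLast ++ [(4, pvOpt 4), (leftover + 2, pvOpt (leftover + 2))]

def calculate_page_layout_alt (total_panels : Int) : List (Int × (Int × Int)) :=
  if total_panels ≤ 8 then [(total_panels, pvOpt total_panels)]
  else pvTail total_panels

-- ===== PRECONDITION & SPEC =====
def Spec_calculate_page_layout (total_panels : Int) (out : List (Int × (Int × Int))) : Prop := out = calculate_page_layout_alt total_panels
instance (total_panels : Int) (out : List (Int × (Int × Int))) : Decidable (Spec_calculate_page_layout total_panels out) := by unfold Spec_calculate_page_layout; infer_instance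

-- ===== CLAIM (what is proved, stated in full; the proofs are below) =====
def Claim_equal_calculate_page_layout : Prop := ∀ (total_panels : Int), Dom_calculate_page_layout total_panels → Spec_calculate_page_layout total_panels (calculate_page_layout total_panels)

-- ===== LEMMAS AND PROOFS =====

-- the ceiling-division bracket: pvFull t is the least k with t - 8 ≤ 6k
lemma pvFull_spec (t : Int) : (pvFull t - 1) * 6 < t - 8 ∧ t - 8 ≤ pvFull t * 6 := by
  unfold pvFull
  rw [PySem.Int.floordiv_eq_ediv_of_pos (by omega)]
  omega

-- the loop returns pages once remaining ≤ 0
lemma pvLoopA_done (fuel : Nat) (pages : List (Int × (Int × Int))) (remaining : Int)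
    (h : remaining ≤ 0) : pvLoopA fuel pages remaining = pages := by
  cases fuel with
  | zero => rfl
  | succ f => simp [pvLoopA]; omega

-- one interior iteration: remaining > 8 emits a 6-panel page
lemma pvLoopA_six (f : Nat) (pages : List (Int × (Int × Int))) (remaining : Int)
    (h : 8 < remaining) :
    pvLoopA (f + 1) pages remaining = pvLoopA f (pages ++ [(6, pvOpt 6)]) (remaining - 6) := by
  simp only [pvLoopA]
  rw [if_pos (by omega), if_neg (by omega)]

-- last iteration, 4 ≤ remaining ≤ 8: emit all remaining panels and stop
lemma pvLoopA_last (f : Nat) (pages : List (Int × (Int × Int))) (remaining : Int)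
    (h4 : 4 ≤ remaining) (h8 : remaining ≤ 8) :
    pvLoopA (f + 1) pages remaining = pages ++ [(remaining, pvOpt remaining)] := by
  simp only [pvLoopA]
  rw [if_pos (by omega), if_pos (by omega), if_pos (by omega)]
  exact pvLoopA_done f _ _ (by omega)

-- last iteration with remaining = 3 and a 6-panel page at the end: borrow 2 panels
lemma pvLoopA_borrow (f : Nat) (pages : List (Int × (Int × Int)))
    (h : pages.getLast? = some (6, pvOpt 6)) :
    pvLoopA (f + 1) pages 3 = pages.dropLast ++ [(4, pvOpt 4), (5, pvOpt 5)] := by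
  simp only [pvLoopA]
  rw [if_pos (by omega), if_pos (by omega), if_neg (by omega), h]
  norm_num
  exact pvLoopA_done f _ _ (by omega)

-- peeling one 6-panel page off the closed form
lemma pvTail_step (r : Int) (h : 8 < r - 6) :
    pvTail r = (6, pvOpt 6) :: pvTail (r - 6) := by
  have hk := pvFull_spec r
  have hk' := pvFull_spec (r - 6)
  have hkk : pvFull r = pvFull (r - 6) + 1 := by omega
  have hpos : 1 ≤ pvFull (r - 6) := by omega
  simp only [pvTail, hkk]
  have h1 : r - 6 * (pvFull (r - 6) + 1) = (r - 6) - 6 * pvFull (r - 6) := by ring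
  rw [h1]
  have hrep : (pvFull (r - 6) + 1).toNat = (pvFull (r - 6)).toNat + 1 := by omega
  rw [hrep, List.replicate_succ]
  by_cases h4 : 4 ≤ (r - 6) - 6 * pvFull (r - 6)
  · simp [h4]
  · have hne : List.replicate (pvFull (r - 6)).toNat ((6 : Int), pvOpt 6) ≠ [] := by
      simp [List.replicate_eq_nil_iff]; omega
    simp only [if_neg h4, List.dropLast_cons_of_ne_nil hne]
    simp

-- the short run: 9 ≤ r ≤ 14 takes exactly one interior page, then the tail page(s)
lemma pvLoopA_small (f : Nat) (pages : List (Int × (Int × Int))) (r : Int)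
    (h8 : 8 < r) (h14 : r ≤ 14) :
    pvLoopA (f + 2) pages r = pages ++ pvTail r := by
  rw [pvLoopA_six (f + 1) pages r h8]
  have hk : pvFull r = 1 := by have := pvFull_spec r; omega
  by_cases h4 : 4 ≤ r - 6
  · rw [pvLoopA_last f _ (r - 6) h4 (by omega)]
    simp only [pvTail, hk]
    norm_num
    simp [show (4:Int) ≤ r - 6 ↔ True from iff_of_true h4 trivial]
  · have hr9 : r = 9 := by omega
    subst hr9
    rw [show (9:Int) - 6 = 3 by norm_num, pvLoopA_borrow f _ (by simp)]
    simp [pvTail, hk]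

-- main loop characterisation: from any page list, a run with remaining > 8 appends pvTail remaining
lemma pvLoopA_tail (n : Nat) : ∀ (remaining : Int) (pages : List (Int × (Int × Int))) (fuel : Nat),
    8 < remaining → remaining ≤ 8 + 6 * (n + 1) → n + 2 ≤ fuel →
    pvLoopA fuel pages remaining = pages ++ pvTail remaining := by
  induction n with
  | zero =>
    intro r pages fuel h8 hub hf
    obtain ⟨f, rfl⟩ : ∃ f, fuel = f + 2 := ⟨fuel - 2, by omega⟩
    exact pvLoopA_small f pages r h8 (by omega)
  | succ m ih =>
    intro r pages fuel h8 hub hf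
    by_cases h8' : 8 < r - 6
    · obtain ⟨f, rfl⟩ : ∃ f, fuel = f + 1 := ⟨fuel - 1, by omega⟩
      rw [pvLoopA_six f pages r h8, ih (r - 6) _ f h8' (by omega) (by omega),
        pvTail_step r h8', List.append_assoc]
      rfl
    · obtain ⟨f, rfl⟩ : ∃ f, fuel = f + 2 := ⟨fuel - 2, by omega⟩
      exact pvLoopA_small f pages r h8 (by omega)

-- ===== VERDICT (by name: the statement is the Claim_ definition above) =====
theorem calculate_page_layout_spec : Claim_equal_calculate_page_layout := by
  intro t _
  unfold Spec_calculate_page_layout calculate_page_layout calculate_page_layout_alt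
  by_cases h : t ≤ 8
  · simp [h]
  · rw [if_neg h, if_neg h]
    have h8 : 8 < t := by omega
    have := pvLoopA_tail (t - 9).toNat t [] t.toNat h8 (by omega) (by omega)
    simpa using this
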